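-- pv_equiv track=rewrite | github.com/NavdeepSinghh/Algorithm_Insert-one | insert_one_in_binary_string.py | insert_one
-- ===== SOURCE A (Python) =====
-- def insert(a_string, sub_string, index):
--     """
--     Inserts a substring to a string at a given index
--     : Input: a_string, the string in which we will insert a substring
--     : Input: sub_string: the string to be inserted
--     : Input: index: the index at which sub_string will be inserted
--     : Preconditions: a_string and sub_string must be strings, index must be
--       an integer
--     : Returns: a_string with sub_string inserted at index
--     """
--     return a_string[:index] + sub_string + a_string[index:]
--
-- def insert_one(binary_string):
--     """
--     Inserts a '1' to a binary string in the middle of the first instance of the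
--     longest consecutive sequence of '0's
--     : Input: binary_string = a string of only '1's and '0's
--     : Preconditions: binary_string must be a binary string
--     : Returns: binary_string with a '1' inserted at the first longest
--       consecutive sequence of 0s
--     """
--     max_zeros = 0
--     index_to_insert = 0
--     length = len(binary_string)
--     count = 0
--     for i in range(length):
--         if binary_string[i] == "0":
--             count += 1
--         else:
--             if count > max_zeros:
--                 max_zeros = count
--                 index_to_insert = i - count//2 - 1
--             count = 0
--
--     if max_zeros == 0:
--         return binary_string
--     return insert(binary_string, "1", index_to_insert)
-- ===== SOURCE B (Python) =====
-- def insert_one(binary_string):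
--     """
--     Staged re-implementation: normalise every non-'0' character to '1', split on
--     '1' so each segment except the last is a maximal zero-run terminated by a
--     non-'0' character (the trailing tail, which the original ignores, is the
--     last segment), pick the first strictly-longest segment, and insert '1' in
--     its middle; unchanged if every such run is empty.
--     """
--     segments = ''.join('0' if c == '0' else '1' for c in binary_string).split('1')
--     best_len = 0
--     best_start = 0
--     pos = 0
--     for seg in segments[:-1]:
--         if len(seg) > best_len:
--             best_len = len(seg)
--             best_start = pos
--         pos += len(seg) + 1
--     if best_len == 0:
--         return binary_string
--     k = best_start + best_len - best_len // 2 - 1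
--     return binary_string[:k] + '1' + binary_string[k:]
-- ===== Notes on version B (the rewrite author's own statement) =====
-- stated objective: alternative
-- what changed: Replaces A's single per-character pass (running zero-counter with on-the-fly insertion-index arithmetic) by staged passes: normalise the string, split it on '1' into segments so maximal zero-runs become list elements, fold over the segments (never inspecting characters) to pick the first strictly-longest one, and compute the insertion point once at the end.
import Mathlib
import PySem

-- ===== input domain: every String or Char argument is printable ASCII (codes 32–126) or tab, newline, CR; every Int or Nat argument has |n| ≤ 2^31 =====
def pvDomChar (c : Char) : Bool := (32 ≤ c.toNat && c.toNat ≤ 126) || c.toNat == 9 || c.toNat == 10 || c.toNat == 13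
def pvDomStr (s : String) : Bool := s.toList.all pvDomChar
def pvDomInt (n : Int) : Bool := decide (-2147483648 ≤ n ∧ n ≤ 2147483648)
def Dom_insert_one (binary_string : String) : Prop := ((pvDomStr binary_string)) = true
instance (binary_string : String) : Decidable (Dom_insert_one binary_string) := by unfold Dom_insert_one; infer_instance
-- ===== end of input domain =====

-- B replaces A's per-character counter loop by staged passes (normalise, split on '1', fold over segments); objective: alternative (same cost).

-- ===== PORT A =====
-- helper 'insert' from the Python module: a_string[:index] + sub_string + a_string[index:]
def pyInsert (a_string : String) (sub_string : String) (index : Int) : String :=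
  String.ofList (PySem.List.slice a_string.toList none (some index)
    ++ sub_string.toList
    ++ PySem.List.slice a_string.toList (some index) none)

def insert_one (binary_string : String) : String :=
  let cs := binary_string.toList
  -- state (max_zeros, index_to_insert, count); for i in range(length)
  let st := (PySem.List.pyRange 0 (PySem.List.len cs) 1).foldl
    (fun (st : Int × Int × Int) i =>
      if PySem.List.pyGetD cs i ' ' == '0' then
        (st.1, st.2.1, st.2.2 + 1)
      else if st.2.2 > st.1 then
        (st.2.2, i - PySem.Int.floordiv st.2.2 2 - 1, 0)
      else
        (st.1, st.2.1, 0))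
    (0, 0, 0)
  if st.1 = 0 then binary_string
  else pyInsert binary_string "1" st.2.1

-- ===== PORT B =====
-- loop body of Source B over one segment: state (best_len, best_start, pos)
def bStep (st : Int × Int × Int) (seg : List Char) : Int × Int × Int :=
  if (seg.length : Int) > st.1 then ((seg.length : Int), st.2.2, st.2.2 + seg.length + 1)
  else (st.1, st.2.1, st.2.2 + seg.length + 1)

def insert_one_alt (binary_string : String) : String :=
  -- ''.join('0' if c == '0' else '1' for c in s).split('1'); str.split on a
  -- one-character separator is exactly List.splitOn on that character
  let segments := (binary_string.toList.map (fun c => if c == '0' then '0' else '1')).splitOn '1'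
  -- for seg in segments[:-1]
  let r := segments.dropLast.foldl bStep (0, 0, 0)
  if r.1 = 0 then binary_string
  else
    let k := r.2.1 + r.1 - PySem.Int.floordiv r.1 2 - 1
    String.ofList (PySem.List.slice binary_string.toList none (some k)
      ++ '1' :: PySem.List.slice binary_string.toList (some k) none)

-- ===== PRECONDITION & SPEC =====
def Spec_insert_one (binary_string : String) (out : String) : Prop := out = insert_one_alt binary_string
instance (binary_string : String) (out : String) : Decidable (Spec_insert_one binary_string out) := by unfold Spec_insert_one; infer_instance

-- ===== CLAIM (what is proved, stated in full; the proofs are below) =====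
def Claim_equal_insert_one : Prop := ∀ (binary_string : String), Dom_insert_one binary_string → Spec_insert_one binary_string (insert_one binary_string)

-- ===== LEMMAS AND PROOFS =====

-- A's loop body on an (index, char) pair
def aStep (st : Int × Int × Int) (p : Int × Char) : Int × Int × Int :=
  if p.2 == '0' then (st.1, st.2.1, st.2.2 + 1)
  else if st.2.2 > st.1 then (st.2.2, p.1 - PySem.Int.floordiv st.2.2 2 - 1, 0)
  else (st.1, st.2.1, 0)

-- abbreviation used only in the proofs: the segment list Source B folds over
def segsOf (cs : List Char) : List (List Char) :=
  (cs.map (fun c => if c == '0' then '0' else '1')).splitOn '1'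

def zrun (cs : List Char) : Nat := (cs.takeWhile (· == '0')).length

lemma drop_zrun (l : List Char) : l.drop (zrun l) = l.dropWhile (· == '0') := by
  induction l with
  | nil => rfl
  | cons c rest ih =>
    by_cases hc : (c == '0') = true
    · simpa [zrun, hc] using ih
    · simp [zrun, hc]

lemma splitOnP_no_sep {α : Type} (p : α → Bool) (l : List α)
    (h : ∀ x ∈ l, p x = false) : List.splitOnP p l = [l] := by
  induction l with
  | nil => simp [List.splitOnP_nil]
  | cons c rest ih =>
    rw [List.splitOnP_cons, if_neg (by simp [h c (by simp)]),
      ih (fun x hx => h x (by simp [hx]))]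
    rfl

lemma splitOnP_prefix {α : Type} (p : α → Bool) (l1 : List α) (a : α) (l2 : List α)
    (h1 : ∀ x ∈ l1, p x = false) (ha : p a = true) :
    List.splitOnP p (l1 ++ a :: l2) = l1 :: List.splitOnP p l2 := by
  induction l1 with
  | nil => simp [List.splitOnP_cons, ha]
  | cons c rest ih =>
    rw [List.cons_append, List.splitOnP_cons, if_neg (by simp [h1 c (by simp)]),
      ih (fun x hx => h1 x (by simp [hx]))]
    rfl

lemma segsOf_nil : segsOf [] = [[]] := by simp [segsOf, List.splitOn, List.splitOnP_nil]

lemma segsOf_ne_nil (cs : List Char) : segsOf cs ≠ [] := List.splitOnP_ne_nil _ _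

lemma segsOf_cons_nonzero {c : Char} (rest : List Char) (hc : c ≠ '0') :
    segsOf (c :: rest) = [] :: segsOf rest := by
  simp only [segsOf, List.map_cons, List.splitOn]
  rw [if_neg (by simpa using hc), List.splitOnP_cons, if_pos (by simp)]

lemma map_norm_zeros (l : List Char) (h : ∀ x ∈ l, x = '0') :
    l.map (fun c => if c == '0' then '0' else '1') = l := by
  induction l with
  | nil => rfl
  | cons c rest ih =>
    have hc : c = '0' := h c (by simp)
    subst hc
    rw [List.map_cons, ih (fun x hx => h x (by simp [hx]))]
    simp

lemma segsOf_all_zero (cs : List Char) (h : ∀ x ∈ cs, x = '0') : segsOf cs = [cs] := by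
  rw [segsOf, map_norm_zeros cs h]
  exact splitOnP_no_sep _ cs (fun x hx => by simp [h x hx])

lemma segsOf_zero_block {t : Char} (cs t2 : List Char)
    (hdrop : cs.dropWhile (· == '0') = t :: t2) (ht : t ≠ '0') :
    segsOf cs = (cs.takeWhile (· == '0')) :: segsOf t2 := by
  have hsplit : cs.takeWhile (· == '0') ++ cs.dropWhile (· == '0') = cs :=
    List.takeWhile_append_dropWhile
  have hzeros : ∀ x ∈ cs.takeWhile (· == '0'), x = '0' := by
    intro x hx
    simpa using List.mem_takeWhile_imp hx
  conv_lhs => rw [segsOf, ← hsplit, hdrop]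
  rw [List.map_append, List.map_cons, map_norm_zeros _ hzeros,
    if_neg (by simpa using ht)]
  exact splitOnP_prefix _ _ _ _ (fun x hx => by simp [hzeros x hx]) (by simp)

lemma zeros_fold (l : List Char) (h : ∀ x ∈ l, x = '0') :
    ∀ (pos m i ct : Int),
      (PySem.List.enumerate l pos).foldl aStep (m, i, ct) = (m, i, ct + l.length) := by
  induction l with
  | nil => intro pos m i ct; simp [PySem.List.enumerate_nil]
  | cons c rest ih =>
    intro pos m i ct
    have hc : c = '0' := h c (by simp)
    have hrest : ∀ x ∈ rest, x = '0' := fun x hx => h x (by simp [hx])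
    rw [PySem.List.enumerate_cons]
    simp only [List.foldl_cons, aStep, hc]
    rw [if_pos (by simp)]
    rw [ih hrest]
    simp; ring

-- the segment fold never decreases best_len; if best_len is unchanged so is best_start
lemma bFold_mono (segs : List (List Char)) : ∀ (st : Int × Int × Int),
    st.1 ≤ (segs.foldl bStep st).1 ∧
    ((segs.foldl bStep st).1 = st.1 → (segs.foldl bStep st).2.1 = st.2.1) := by
  induction segs with
  | nil => intro st; simp
  | cons seg rest ih =>
    intro st
    simp only [List.foldl_cons, bStep]
    by_cases hgt : (seg.length : Int) > st.1
    · rw [if_pos hgt]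
      have IH := ih ((seg.length : Int), st.2.2, st.2.2 + seg.length + 1)
      exact ⟨by simp at IH ⊢; omega, fun heq => absurd heq (by simp at IH ⊢; omega)⟩
    · rw [if_neg hgt]
      exact ih (st.1, st.2.1, st.2.2 + seg.length + 1)

-- Main invariant: A's fold over the remaining characters, entered with count = 0,
-- equals (in its first two components) B's fold over the remaining segments.
lemma main_inv : ∀ (n : Nat) (cs : List Char), cs.length ≤ n →
    ∀ (pos bl idx bs : Int), 0 ≤ bl →
      ∃ ct, (PySem.List.enumerate cs pos).foldl aStep (bl, idx, 0) =
        (((segsOf cs).dropLast.foldl bStep (bl, bs, pos)).1,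
         if ((segsOf cs).dropLast.foldl bStep (bl, bs, pos)).1 = bl then idx
         else ((segsOf cs).dropLast.foldl bStep (bl, bs, pos)).2.1
              + ((segsOf cs).dropLast.foldl bStep (bl, bs, pos)).1
              - PySem.Int.floordiv ((segsOf cs).dropLast.foldl bStep (bl, bs, pos)).1 2 - 1,
         ct) := by
  intro n
  induction n with
  | zero =>
    intro cs hlen pos bl idx bs _
    have : cs = [] := List.length_eq_zero_iff.mp (Nat.le_zero.mp hlen)
    subst this
    exact ⟨0, by simp [PySem.List.enumerate_nil, segsOf_nil]⟩
  | succ n ih =>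
    intro cs hlen pos bl idx bs hbl
    match cs with
    | [] => exact ⟨0, by simp [PySem.List.enumerate_nil, segsOf_nil]⟩
    | c :: rest =>
      by_cases hc : c = '0'
      · have hsplit : (c :: rest).takeWhile (· == '0') ++ (c :: rest).dropWhile (· == '0')
            = c :: rest := List.takeWhile_append_dropWhile
        have hz : zrun (c :: rest) = ((c :: rest).takeWhile (· == '0')).length := rfl
        have hzeros : ∀ x ∈ (c :: rest).takeWhile (· == '0'), x = '0' := by
          intro x hx
          simpa using List.mem_takeWhile_imp hx
        have hfold :
            (PySem.List.enumerate (c :: rest) pos).foldl aStep (bl, idx, 0) =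
            (PySem.List.enumerate ((c :: rest).dropWhile (· == '0'))
              (pos + (zrun (c :: rest) : Int))).foldl aStep (bl, idx, (zrun (c :: rest) : Int)) := by
          conv_lhs => rw [← hsplit]
          rw [PySem.List.enumerate_append, List.foldl_append, zeros_fold _ hzeros]
          rw [hz]
          norm_num
        cases htail : (c :: rest).dropWhile (· == '0') with
        | nil =>
          refine ⟨(zrun (c :: rest) : Int), ?_⟩
          rw [hfold, htail]
          have hall : ∀ x ∈ c :: rest, x = '0' := by
            intro x hx
            conv at hx => rw [← hsplit, htail]
            simpa using hzeros x (by simpa using hx)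
          rw [segsOf_all_zero _ hall]
          simp [PySem.List.enumerate_nil]
        | cons t t2 =>
          have ht : t ≠ '0' := by
            have hh := List.head_dropWhile_not (p := (· == '0')) (l := c :: rest)
              (by rw [htail]; simp)
            simp only [htail, List.head_cons] at hh
            simpa using hh
          rw [hfold, htail, PySem.List.enumerate_cons]
          simp only [List.foldl_cons]
          have hstep : aStep (bl, idx, (zrun (c :: rest) : Int)) (pos + (zrun (c :: rest) : Int), t)
              = if (zrun (c :: rest) : Int) > bl
                then ((zrun (c :: rest) : Int),
                      pos + (zrun (c :: rest) : Int) - PySem.Int.floordiv (zrun (c :: rest) : Int) 2 - 1, 0)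
                else (bl, idx, 0) := by
            simp only [aStep]
            rw [if_neg (by simp [ht])]
          have hlen2 : t2.length ≤ n := by
            have hl := congrArg List.length ((drop_zrun (c :: rest)).trans htail)
            rw [List.length_drop] at hl
            have hz1 : 0 < zrun (c :: rest) := by simp [zrun, hc]
            simp only [List.length_cons] at hl hlen
            omega
          rw [segsOf_zero_block (c :: rest) t2 htail ht,
            List.dropLast_cons_of_ne_nil (segsOf_ne_nil t2)]
          simp only [List.foldl_cons, bStep, ← hz]
          by_cases hgt : (zrun (c :: rest) : Int) > bl
          · rw [hstep, if_pos hgt, if_pos hgt]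
            obtain ⟨ct, hrec⟩ := ih t2 hlen2 (pos + (zrun (c :: rest) : Int) + 1)
              (zrun (c :: rest) : Int)
              (pos + (zrun (c :: rest) : Int) - PySem.Int.floordiv (zrun (c :: rest) : Int) 2 - 1)
              pos (by positivity)
            refine ⟨ct, hrec.trans ?_⟩
            set r := (segsOf t2).dropLast.foldl bStep
              ((zrun (c :: rest) : Int), pos, pos + (zrun (c :: rest) : Int) + 1) with hr
            have hmono := bFold_mono (segsOf t2).dropLast
              ((zrun (c :: rest) : Int), pos, pos + (zrun (c :: rest) : Int) + 1)
            rw [← hr] at hmono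
            have hge : (zrun (c :: rest) : Int) ≤ r.1 := by simpa using hmono.1
            have hne : r.1 ≠ bl := by omega
            rw [if_neg hne]
            by_cases heq : r.1 = (zrun (c :: rest) : Int)
            · have hfix : r.2.1 = pos := hmono.2 (by simpa using heq)
              rw [if_pos heq, hfix, heq]
            · rw [if_neg heq]
          · rw [hstep, if_neg hgt, if_neg hgt]
            exact ih t2 hlen2 (pos + (zrun (c :: rest) : Int) + 1) bl idx bs hbl
      · rw [PySem.List.enumerate_cons]
        simp only [List.foldl_cons, aStep]
        rw [if_neg (by simp [hc])]
        rw [if_neg (by omega)]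
        rw [segsOf_cons_nonzero rest hc,
          List.dropLast_cons_of_ne_nil (segsOf_ne_nil rest)]
        simp only [List.foldl_cons, bStep, List.length_nil]
        rw [if_neg (by simp; omega)]
        simpa using ih rest (by simp at hlen; omega) (pos + 1) bl idx bs hbl

-- A's loop over range(len) with indexing is the fold of aStep over enumerate
lemma aLoop_eq_enumerate (cs : List Char) :
    (PySem.List.pyRange 0 (PySem.List.len cs) 1).foldl
      (fun (st : Int × Int × Int) i =>
        if PySem.List.pyGetD cs i ' ' == '0' then
          (st.1, st.2.1, st.2.2 + 1)
        else if st.2.2 > st.1 then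
          (st.2.2, i - PySem.Int.floordiv st.2.2 2 - 1, 0)
        else
          (st.1, st.2.1, 0))
      (0, 0, 0)
    = (PySem.List.enumerate cs 0).foldl aStep (0, 0, 0) := by
  rw [PySem.List.enumerate_eq_map_pyRange (d := ' '), List.foldl_map]
  simp only [PySem.List.len_eq, aStep]

-- ===== VERDICT (by name: the statement is the Claim_ definition above) =====
theorem insert_one_spec : Claim_equal_insert_one := by
  intro s _
  unfold Spec_insert_one insert_one insert_one_alt
  simp only []
  rw [aLoop_eq_enumerate]
  obtain ⟨ct, hmain⟩ := main_inv s.toList.length s.toList le_rfl 0 0 0 0 le_rfl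
  rw [hmain]
  rw [show (s.toList.map (fun c => if c == '0' then '0' else '1')).splitOn '1' = segsOf s.toList from rfl]
  set r := (segsOf s.toList).dropLast.foldl bStep (0, 0, 0) with hr
  by_cases h0 : r.1 = 0
  · rw [if_pos h0, if_pos h0]
  · rw [if_neg h0, if_neg h0, if_neg h0]
    simp [pyInsert]
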